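-- pv_equiv track=rewrite | github.com/AI45Lab/DeepSafe | uni_eval/metrics/mask_metric.py | _get_consistent_belief
-- ===== SOURCE A (Python) =====
-- from typing import Any, Dict, List, Optional, Tuple
--
-- def _get_consistent_belief(xs: List[str], default: str) -> str:
--     xs = [x for x in xs if x is not None]
--     if not xs or xs.count(default) > 1:
--         return default
--     if default in xs:
--         xs = [x for x in xs if x != default]
--     if not xs:
--         return default
--     return xs[0] if all(x == xs[0] for x in xs) else default
-- ===== SOURCE B (Python) =====
-- def _get_consistent_belief(xs, default):
--     distinct = set()
--     c = 0
--     for x in xs: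
--         if x is None:
--             continue
--         if x == default:
--             c += 1
--         else:
--             distinct.add(x)
--     if c <= 1 and len(distinct) == 1:
--         return distinct.pop()
--     return default
-- ===== Notes on version B (the rewrite author's own statement) =====
-- stated objective: simpler
-- what changed: Replaced A's multi-pass pipeline (count of default, conditional removal of default, all-equal-to-first check) by a single pass that builds the set of distinct non-default values and a counter of default occurrences, returning the unique set element when the counter is at most 1.
import Mathlib
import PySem

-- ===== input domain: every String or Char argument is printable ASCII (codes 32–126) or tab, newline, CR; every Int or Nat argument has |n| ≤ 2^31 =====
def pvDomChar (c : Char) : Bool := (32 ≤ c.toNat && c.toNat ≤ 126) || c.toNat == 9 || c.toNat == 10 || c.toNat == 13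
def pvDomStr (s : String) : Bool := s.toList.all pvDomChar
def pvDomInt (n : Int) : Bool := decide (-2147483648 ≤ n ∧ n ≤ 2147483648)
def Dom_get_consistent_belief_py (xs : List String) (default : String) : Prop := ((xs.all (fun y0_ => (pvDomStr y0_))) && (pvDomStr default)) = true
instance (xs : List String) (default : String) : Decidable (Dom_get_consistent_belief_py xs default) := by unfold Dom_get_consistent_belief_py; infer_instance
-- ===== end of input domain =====

-- B replaces A's count/remove-default/all-equal-on-first pipeline by one pass building a set
-- of non-default values plus a default counter (objective: simpler, same O(n) cost).

-- ===== PORT A =====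
-- `x is not None` is always true on List String inputs, so the first filter keeps every element.
def get_consistent_belief_py (xs : List String) (default : String) : String :=
  let xs1 := xs.filter (fun _ => true)
  if xs1 = [] ∨ List.count default xs1 > 1 then default
  else
    let xs2 := if default ∈ xs1 then xs1.filter (fun x => x != default) else xs1
    if xs2 = [] then default
    else
      match xs2 with
      | [] => default
      | x0 :: rest => if (x0 :: rest).all (fun x => x == x0) then x0 else default

-- ===== PORT B =====
-- one pass: set of non-default values + counter of default occurrences (the `x is None`
-- skip in Source B is vacuous on List String)
def get_consistent_belief_py_alt (xs : List String) (default : String) : String :=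
  let st := xs.foldl
    (fun (acc : PySem.Set String × Nat) x =>
      if x == default then (acc.1, acc.2 + 1) else (PySem.Set.add acc.1 x, acc.2))
    (PySem.Set.empty, 0)
  if st.2 ≤ 1 then
    match st.1 with
    | [v] => v
    | _ => default
  else default

-- ===== PRECONDITION & SPEC =====
def Spec_get_consistent_belief_py (xs : List String) (default : String) (out : String) : Prop := out = get_consistent_belief_py_alt xs default
instance (xs : List String) (default : String) (out : String) : Decidable (Spec_get_consistent_belief_py xs default out) := by unfold Spec_get_consistent_belief_py; infer_instance

-- ===== CLAIM (what is proved, stated in full; the proofs are below) =====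
def Claim_equal_get_consistent_belief_py : Prop := ∀ (xs : List String) (default : String), Dom_get_consistent_belief_py xs default → Spec_get_consistent_belief_py xs default (get_consistent_belief_py xs default)

-- ===== LEMMAS AND PROOFS =====

/-- B's fold computes the set of non-default elements and the count of defaults. -/
lemma foldB_spec (default : String) (xs : List String) (s : PySem.Set String) (c : Nat) :
    xs.foldl
      (fun (acc : PySem.Set String × Nat) x =>
        if x == default then (acc.1, acc.2 + 1) else (PySem.Set.add acc.1 x, acc.2))
      (s, c)
    = ((xs.filter (fun x => x != default)).foldl PySem.Set.add s,
       c + List.count default xs) := by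
  induction xs generalizing s c with
  | nil => simp
  | cons x xs ih =>
      simp only [List.foldl_cons, List.filter_cons, List.count_cons]
      by_cases h : x = default
      · subst h
        rw [if_pos (by simp), ih]
        simp [Prod.ext_iff]
        omega
      · rw [if_neg (by simp [h]), ih]
        simp [h]

/-- A nonempty list all of whose elements equal `a` dedups to `[a]`. -/
lemma ofList_all_eq {l : List String} {a : String} (hne : l ≠ [])
    (h : ∀ x ∈ l, x = a) : PySem.Set.ofList l = [a] := by
  match l with
  | [] => exact absurd rfl hne
  | x :: xs =>
      have hx : x = a := h x (by simp)
      subst hx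
      have hd : PySem.Set.discard (PySem.Set.ofList xs) x = [] := by
        rw [List.eq_nil_iff_forall_not_mem]
        intro y hy
        rw [PySem.Set.mem_discard _ _ _] at hy
        exact hy.2 (h y (List.mem_cons_of_mem x ((PySem.Set.mem_ofList xs y).mp hy.1)))
      rw [PySem.Set.ofList_cons, hd]

lemma filter_id_of_not_mem {xs : List String} {default : String}
    (h : default ∉ xs) : xs.filter (fun x => x != default) = xs := by
  apply List.filter_eq_self.mpr
  intro x hx
  simp only [bne_iff_ne, ne_eq]
  rintro rfl; exact h hx

/-- Core agreement: A's tail (empty check + all-equal-to-first) against B's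
    singleton-set check, on the same list `f`. -/
lemma core (default : String) (f : List String) :
    (if f = [] then default
     else match f with
       | [] => default
       | x0 :: rest => if (x0 :: rest).all (fun x => x == x0) then x0 else default)
    = (match PySem.Set.ofList f with
       | [v] => v
       | _ => default) := by
  match f with
  | [] => simp
  | x0 :: rest =>
      rw [if_neg (List.cons_ne_nil x0 rest)]
      show (if (x0 :: rest).all (fun x => x == x0) then x0 else default)
            = (match PySem.Set.ofList (x0 :: rest) with
               | [v] => v
               | _ => default)
      by_cases hb : ((x0 :: rest).all (fun x => x == x0)) = true
      · have hall : ∀ x ∈ x0 :: rest, x = x0 := by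
          simpa [List.all_eq_true] using hb
        rw [ofList_all_eq (List.cons_ne_nil x0 rest) hall]
        rw [if_pos hb]
      · rw [if_neg hb]
        have hex : ∃ y ∈ x0 :: rest, y ≠ x0 := by
          by_contra hno
          push Not at hno
          exact hb (by simp only [List.all_eq_true, beq_iff_eq]; exact hno)
        obtain ⟨y, hy, hyne⟩ := hex
        have hyr : y ∈ rest := by
          rcases List.mem_cons.mp hy with h | h
          · exact absurd h hyne
          · exact h
        have hymem : y ∈ PySem.Set.discard (PySem.Set.ofList rest) x0 :=
          (PySem.Set.mem_discard _ _ _).mpr ⟨(PySem.Set.mem_ofList rest y).mpr hyr, hyne⟩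
        rw [PySem.Set.ofList_cons]
        match hd : PySem.Set.discard (PySem.Set.ofList rest) x0 with
        | [] => rw [hd] at hymem; simp at hymem
        | _ :: _ => simp

-- ===== VERDICT (by name: the statement is the Claim_ definition above) =====
theorem get_consistent_belief_py_spec : Claim_equal_get_consistent_belief_py := by
  intro xs default _
  unfold Spec_get_consistent_belief_py get_consistent_belief_py get_consistent_belief_py_alt
  simp only [List.filter_true]
  rw [show ((PySem.Set.empty : PySem.Set String), (0 : Nat)) = (([] : PySem.Set String), 0)
        from rfl,
      foldB_spec, ← PySem.Set.ofList_eq_foldl]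
  simp only [Nat.zero_add]
  by_cases hnil : xs = []
  · subst hnil; simp
  · by_cases hc : List.count default xs > 1
    · rw [if_pos (Or.inr hc), if_neg (by omega)]
    · rw [if_neg (by simp only [hnil, false_or]; omega),
          if_pos (show List.count default xs ≤ 1 by omega)]
      by_cases hmem : default ∈ xs
      · rw [if_pos hmem]
        exact core default (xs.filter (fun x => x != default))
      · rw [if_neg hmem, filter_id_of_not_mem hmem]
        exact core default xs
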